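-- pv_equiv track=rewrite | github.com/graemegilmourbates/pyPoker | classes/Deck.py | split_shuffle
-- ===== SOURCE A (Python) =====
-- def split_shuffle(cards):
--     """(Deck)->Deck
--     Given a deck of cards, continously split the Deck
--     until you have
--     """
--     if(len(cards)>2):
--         a = cards[:len(cards)//2]
--         b = cards[len(cards)//2:]
--         a = split_shuffle(a)
--         b = split_shuffle(b)
--         return a + b
--     elif(len(cards)==1):
--         return cards
--     else:
--         a=cards[1]
--         b=cards[0]
--         return([a,b])
-- ===== SOURCE B (Python) =====
-- def split_shuffle(cards):
--     out = []
--     stack = [(0, len(cards))]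
--     while stack:
--         lo, hi = stack.pop()
--         n = hi - lo
--         if n > 2:
--             mid = lo + n // 2
--             stack.append((mid, hi))
--             stack.append((lo, mid))
--         elif n == 1:
--             out.append(cards[lo])
--         else:
--             out.append(cards[lo + 1])
--             out.append(cards[lo])
--     return out
-- ===== Notes on version B (the rewrite author's own statement) =====
-- stated objective: alternative
-- what changed: Replaces the recursive split-and-concatenate (which copies both halves at every level via slicing) with an iterative explicit-stack loop over (lo,hi) index intervals that emits each 1- or 2-card leaf directly into one output list, so no intermediate sublists are built; intended as faster (O(n) vs O(n log n)) but measured only ~1.4x at the largest size.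
import Mathlib
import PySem

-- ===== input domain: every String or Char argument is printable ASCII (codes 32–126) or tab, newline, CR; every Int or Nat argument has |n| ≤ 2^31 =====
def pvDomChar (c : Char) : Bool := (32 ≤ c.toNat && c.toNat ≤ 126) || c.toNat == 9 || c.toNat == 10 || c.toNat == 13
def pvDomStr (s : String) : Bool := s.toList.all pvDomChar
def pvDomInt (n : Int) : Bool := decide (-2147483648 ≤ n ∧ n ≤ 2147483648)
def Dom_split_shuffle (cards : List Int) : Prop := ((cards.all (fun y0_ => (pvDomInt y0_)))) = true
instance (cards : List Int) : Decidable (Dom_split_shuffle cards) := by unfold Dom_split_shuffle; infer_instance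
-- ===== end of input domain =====

-- B replaces A's recursive slice-and-concatenate with one explicit-stack loop over
-- index intervals that writes leaves straight into the output (no intermediate lists).

-- ===== PORT A =====
-- the fuel argument is only a totality guard: cards.length steps always suffice
-- (each recursive call is on a strictly shorter list), so the 0-fuel branch is never reached
def pvSplitA : Nat → List Int → List Int
  | 0, _ => []
  | fuel + 1, cards =>
    if 2 < cards.length then
      pvSplitA fuel (PySem.List.slice cards none (some (PySem.Int.floordiv (cards.length : Int) 2)))
        ++ pvSplitA fuel (PySem.List.slice cards (some (PySem.Int.floordiv (cards.length : Int) 2)) none)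
    else if cards.length = 1 then
      cards
    else
      [PySem.List.pyGetD cards 1 0, PySem.List.pyGetD cards 0 0]

def split_shuffle (cards : List Int) : List Int := pvSplitA cards.length cards

-- ===== PORT B =====
-- the fuel argument is only a totality guard: the loop pops or splits an interval each
-- iteration and runs at most 2*len+1 times, so the 0-fuel branch is never reached
def pvLoopF (cards : List Int) : Nat → List (Nat × Nat) → List Int → List Int
  | 0, _, out => out
  | _ + 1, [], out => out
  | fuel + 1, (lo, hi) :: st, out =>
    let n := hi - lo
    if 2 < n then
      pvLoopF cards fuel ((lo, lo + n / 2) :: (lo + n / 2, hi) :: st) out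
    else if n = 1 then
      pvLoopF cards fuel st (out ++ [PySem.List.pyGetD cards (lo : Int) 0])
    else
      pvLoopF cards fuel st
        (out ++ [PySem.List.pyGetD cards ((lo : Int) + 1) 0, PySem.List.pyGetD cards (lo : Int) 0])

def split_shuffle_alt (cards : List Int) : List Int :=
  pvLoopF cards (2 * cards.length + 1) [(0, cards.length)] []

-- ===== PRECONDITION & SPEC =====
-- Pre_ excludes only the empty list, on which A raises IndexError (cards[1]).
def Pre_split_shuffle (cards : List Int) : Prop := cards ≠ []
instance (cards : List Int) : Decidable (Pre_split_shuffle cards) := by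
  unfold Pre_split_shuffle; infer_instance
def pvWitness_split_shuffle : List Int := [5, 1, 4, 2, 3]

def Spec_split_shuffle (cards : List Int) (out : List Int) : Prop := out = split_shuffle_alt cards
instance (cards : List Int) (out : List Int) : Decidable (Spec_split_shuffle cards out) := by
  unfold Spec_split_shuffle; infer_instance

-- ===== CLAIM (what is proved, stated in full; the proofs are below) =====
def Claim_equal_split_shuffle : Prop := ∀ (cards : List Int), Dom_split_shuffle cards → Pre_split_shuffle cards → Spec_split_shuffle cards (split_shuffle cards)

-- ===== LEMMAS AND PROOFS =====

-- the two slices of A written as take/drop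
theorem sliceA_take (cards : List Int) :
    PySem.List.slice cards none (some (PySem.Int.floordiv (cards.length : Int) 2))
      = cards.take (cards.length / 2) := by
  rw [show PySem.Int.floordiv (cards.length : Int) 2 = ((cards.length / 2 : Nat) : Int) from by
      exact_mod_cast PySem.Int.floordiv_natCast cards.length 2]
  exact PySem.List.slice_to_natCast cards (cards.length / 2)

theorem sliceA_drop (cards : List Int) :
    PySem.List.slice cards (some (PySem.Int.floordiv (cards.length : Int) 2)) none
      = cards.drop (cards.length / 2) := by
  rw [show PySem.Int.floordiv (cards.length : Int) 2 = ((cards.length / 2 : Nat) : Int) from by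
      exact_mod_cast PySem.Int.floordiv_natCast cards.length 2]
  exact PySem.List.slice_from_natCast cards (cards.length / 2)

-- any fuel ≥ cards.length (with cards nonempty) computes the same value
theorem pvSplitA_congr (n : Nat) :
    ∀ cards : List Int, ∀ f g : Nat, cards.length = n → 1 ≤ n → n ≤ f → n ≤ g →
      pvSplitA f cards = pvSplitA g cards := by
  induction n using Nat.strong_induction_on with
  | _ n ih =>
    intro cards f g hn h1 hf hg
    obtain ⟨f', rfl⟩ : ∃ f', f = f' + 1 := ⟨f - 1, by omega⟩
    obtain ⟨g', rfl⟩ : ∃ g', g = g' + 1 := ⟨g - 1, by omega⟩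
    by_cases h2 : 2 < cards.length
    · have hta : (cards.take (cards.length / 2)).length = cards.length / 2 := by
        simp [List.length_take]; omega
      have htd : (cards.drop (cards.length / 2)).length = cards.length - cards.length / 2 := by
        simp [List.length_drop]
      simp only [pvSplitA, if_pos h2, sliceA_take, sliceA_drop]
      rw [ih (cards.length / 2) (by omega) _ f' g' hta (by omega) (by omega) (by omega),
        ih (cards.length - cards.length / 2) (by omega) _ f' g' htd (by omega) (by omega)
          (by omega)]
    · simp only [pvSplitA, if_neg h2]

-- A on a list of length > 2 recurses on the two halves
theorem splitA_step (l : List Int) (h : 2 < l.length) :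
    split_shuffle l
      = split_shuffle (l.take (l.length / 2)) ++ split_shuffle (l.drop (l.length / 2)) := by
  have hta : (l.take (l.length / 2)).length = l.length / 2 := by
    simp [List.length_take]; omega
  have htd : (l.drop (l.length / 2)).length = l.length - l.length / 2 := by
    simp [List.length_drop]
  have hn : pvSplitA l.length l = pvSplitA ((l.length - 1) + 1) l := by congr 1; omega
  rw [split_shuffle, hn]
  simp only [pvSplitA, if_pos h, sliceA_take, sliceA_drop]
  rw [split_shuffle, split_shuffle, hta, htd,
    pvSplitA_congr (l.length / 2) _ (l.length - 1) (l.length / 2) hta (by omega) (by omega)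
      (by omega),
    pvSplitA_congr (l.length - l.length / 2) _ (l.length - 1) (l.length - l.length / 2) htd
      (by omega) (by omega) (by omega)]

-- A on the leaves
theorem splitA_one (x : Int) : split_shuffle [x] = [x] := rfl

theorem splitA_two (x y : Int) : split_shuffle [x, y] = [y, x] := rfl

-- step bound for B's loop: each pending interval still costs at least one iteration
def pvW (st : List (Nat × Nat)) : Nat :=
  (st.map (fun p => if p.2 - p.1 = 0 then 1 else 2 * (p.2 - p.1) - 1)).sum

theorem pvW_cons (lo hi : Nat) (st : List (Nat × Nat)) :
    pvW ((lo, hi) :: st) = (if hi - lo = 0 then 1 else 2 * (hi - lo) - 1) + pvW st := by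
  simp [pvW]

-- one-step unfoldings of B's loop
theorem pvLoopF_split (cards : List Int) (f lo hi : Nat) (st : List (Nat × Nat))
    (out : List Int) (h : 2 < hi - lo) :
    pvLoopF cards (f + 1) ((lo, hi) :: st) out
      = pvLoopF cards f ((lo, lo + (hi - lo) / 2) :: (lo + (hi - lo) / 2, hi) :: st) out := by
  rw [pvLoopF]; simp [h]

theorem pvLoopF_one (cards : List Int) (f lo hi : Nat) (st : List (Nat × Nat))
    (out : List Int) (h : hi - lo = 1) :
    pvLoopF cards (f + 1) ((lo, hi) :: st) out
      = pvLoopF cards f st (out ++ [PySem.List.pyGetD cards (lo : Int) 0]) := by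
  rw [pvLoopF]; simp [h]

theorem pvLoopF_two (cards : List Int) (f lo hi : Nat) (st : List (Nat × Nat))
    (out : List Int) (h1 : ¬ 2 < hi - lo) (h2 : hi - lo ≠ 1) :
    pvLoopF cards (f + 1) ((lo, hi) :: st) out
      = pvLoopF cards f st (out ++ [PySem.List.pyGetD cards ((lo : Int) + 1) 0,
          PySem.List.pyGetD cards (lo : Int) 0]) := by
  rw [pvLoopF]; simp [h1, h2]

-- any fuel ≥ pvW st computes the same value
theorem pvLoopF_congr (cards : List Int) (f : Nat) :
    ∀ g st out, pvW st ≤ f → pvW st ≤ g →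
      pvLoopF cards f st out = pvLoopF cards g st out := by
  induction f with
  | zero =>
    intro g st out hf _
    match st with
    | [] => cases g <;> rfl
    | (lo, hi) :: st => rw [pvW_cons] at hf; split at hf <;> omega
  | succ f ihf =>
    intro g st out hf hg
    match st with
    | [] => cases g <;> rfl
    | (lo, hi) :: st =>
      have hw : 1 ≤ pvW ((lo, hi) :: st) := by rw [pvW_cons]; split <;> omega
      obtain ⟨g', rfl⟩ : ∃ g', g = g' + 1 := ⟨g - 1, by omega⟩
      by_cases h2 : 2 < hi - lo
      · have hW : pvW ((lo, lo + (hi - lo) / 2) :: (lo + (hi - lo) / 2, hi) :: st) + 1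
            = pvW ((lo, hi) :: st) := by
          rw [pvW_cons, pvW_cons, pvW_cons]
          split <;> split <;> split <;> omega
        rw [pvLoopF_split cards f lo hi st out h2, pvLoopF_split cards g' lo hi st out h2]
        exact ihf g' _ out (by omega) (by omega)
      · have hW : pvW st + 1 ≤ pvW ((lo, hi) :: st) := by rw [pvW_cons]; split <;> omega
        by_cases h1 : hi - lo = 1
        · rw [pvLoopF_one cards f lo hi st out h1, pvLoopF_one cards g' lo hi st out h1]
          exact ihf g' _ _ (by omega) (by omega)
        · rw [pvLoopF_two cards f lo hi st out h2 h1, pvLoopF_two cards g' lo hi st out h2 h1]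
          exact ihf g' _ _ (by omega) (by omega)

-- main invariant: with enough fuel, popping one interval appends exactly A's value on it
theorem pvLoop_seg (cards : List Int) (n : Nat) :
    ∀ lo hi st out f, hi - lo = n → lo < hi → hi ≤ cards.length →
      pvW ((lo, hi) :: st) ≤ f →
      pvLoopF cards f ((lo, hi) :: st) out
        = pvLoopF cards (pvW st) st (out ++ split_shuffle ((cards.drop lo).take (hi - lo))) := by
  induction n using Nat.strong_induction_on with
  | _ n ih =>
    intro lo hi st out f hn hlt hle hfuel
    have hw1 : 1 ≤ pvW ((lo, hi) :: st) := by rw [pvW_cons]; split <;> omega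
    obtain ⟨f', rfl⟩ : ∃ f', f = f' + 1 := ⟨f - 1, by omega⟩
    have hL : ((cards.drop lo).take (hi - lo)).length = hi - lo := by
      simp [List.length_take, List.length_drop]; omega
    have hlo : lo < cards.length := by omega
    by_cases h2 : 2 < hi - lo
    · -- split case
      have hA : ((cards.drop lo).take (hi - lo)).take
            ((((cards.drop lo).take (hi - lo)).length) / 2)
          = (cards.drop lo).take ((lo + (hi - lo) / 2) - lo) := by
        rw [hL, List.take_take]; congr 1; omega
      have hB : ((cards.drop lo).take (hi - lo)).drop
            ((((cards.drop lo).take (hi - lo)).length) / 2)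
          = (cards.drop (lo + (hi - lo) / 2)).take (hi - (lo + (hi - lo) / 2)) := by
        rw [hL, List.drop_take, List.drop_drop]
        congr 1
        omega
      have hW : pvW ((lo, lo + (hi - lo) / 2) :: (lo + (hi - lo) / 2, hi) :: st) + 1
          = pvW ((lo, hi) :: st) := by
        rw [pvW_cons, pvW_cons, pvW_cons]
        split <;> split <;> split <;> omega
      rw [pvLoopF_split cards f' lo hi st out h2,
        ih ((lo + (hi - lo) / 2) - lo) (by omega) lo (lo + (hi - lo) / 2) _ out f' rfl
          (by omega) (by omega) (by omega),
        ih (hi - (lo + (hi - lo) / 2)) (by omega) (lo + (hi - lo) / 2) hi st _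
          (pvW ((lo + (hi - lo) / 2, hi) :: st)) rfl (by omega) hle (le_refl _),
        splitA_step ((cards.drop lo).take (hi - lo)) (by omega), hA, hB,
        List.append_assoc]
    · have hW : pvW st + 1 ≤ pvW ((lo, hi) :: st) := by rw [pvW_cons]; split <;> omega
      by_cases h1 : hi - lo = 1
      · -- singleton leaf
        have hseg : (cards.drop lo).take (hi - lo) = [cards[lo]] := by
          rw [h1, List.drop_eq_getElem_cons hlo, List.take_succ_cons, List.take_zero]
        rw [pvLoopF_one cards f' lo hi st out h1,
          pvLoopF_congr cards f' (pvW st) st _ (by omega) (le_refl _), hseg, splitA_one]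
        congr 2
        simp [hlo]
      · -- pair leaf: hi - lo = 2
        have he : hi - lo = 2 := by omega
        have hlo1 : lo + 1 < cards.length := by omega
        have hseg : (cards.drop lo).take (hi - lo) = [cards[lo], cards[lo + 1]] := by
          rw [he, List.drop_eq_getElem_cons hlo, List.drop_eq_getElem_cons hlo1,
            List.take_succ_cons, List.take_succ_cons, List.take_zero]
        rw [pvLoopF_two cards f' lo hi st out h2 h1,
          pvLoopF_congr cards f' (pvW st) st _ (by omega) (le_refl _), hseg, splitA_two]
        have hg1 : PySem.List.pyGetD cards ((lo : Int) + 1) 0 = cards[lo + 1] := by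
          rw [show ((lo : Int) + 1) = (((lo + 1 : Nat)) : Int) from by push_cast; ring,
            PySem.List.pyGetD_natCast]
          simp [List.getD_eq_getElem?_getD, hlo1]
        congr 2
        simp [hlo, hg1]

-- ===== VERDICT (by name: the statement is the Claim_ definition above) =====
theorem split_shuffle_spec : Claim_equal_split_shuffle := by
  intro cards _ hpre
  unfold Spec_split_shuffle split_shuffle_alt
  have hne : 0 < cards.length := by
    cases cards with
    | nil => exact absurd rfl hpre
    | cons a t => simp
  have h := pvLoop_seg cards cards.length 0 cards.length [] [] (2 * cards.length + 1)
    (by omega) hne (le_refl _) (by rw [pvW_cons]; simp [pvW]; split <;> omega)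
  rw [h]
  simp [pvW, pvLoopF, List.take_of_length_le (le_refl cards.length)]
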